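-- pv_equiv track=rewrite | github.com/pabloortegaa/victor | victor.py | find_high_inverses
-- ===== SOURCE A (Python) =====
-- def is_true_threat(threat):
--     """Checks if the threat coordinates are true.
--
--     Args:
--         threat: a tuple of 2 tuples representing the threat coordinates of the start and end of the threat.
--     """
--     threat_start = threat[0]
--     threat_end = threat[1]
--
--     # Filter out squares further than 3 positions apart.
--     row_diff = threat_start[0] - threat_end[0]
--     if abs(row_diff) > 3:
--         return False
--     col_diff = threat_start[1] - threat_end[1]
--     if abs(col_diff) > 3:
--         return False
--
--     # If the two squares are in the same row or column, it is possible for them to be connected.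
--     # The two squares can be connected diagonally only if row_diff and col_diff are the same.
--     if row_diff == 0 or col_diff == 0:
--         return True
--     if abs(row_diff) == abs(col_diff):
--         return True
--     return False
--
-- def find_high_inverses(board):
--     """Finds all the high_inverses on a board. Could be seen as combinations of Claimeven + Lowinverse (with claimeven at the top).
--
--     Required:
--         Two different columns, each with 3 squares lying directly above each other.
--         All six squares are empty.
--         In both columns the upper square is even
--
--     Returns:
--         List with tuples of high_inverses that are possible threats.
--         Inside each tuple, 2 coords that represent lowest square of the group in each column.
--     """
--     columns = [] # List of columns that have 3 squares above each other (with even top square)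
--     for row in range(1, len(board)-2, 2):
--         for col in range(len(board[0])):
--             # If lower square of the highinverse is empty
--             if board[row][col] == '.' and col not in columns:
--                 columns.append(col)
--
--     high_inverses = []
--     for i in range(len(columns)):
--         col1 = columns[i]
--         for col2 in columns[i+1:]:
--             for row_col1 in range(1, len(board)-2, 2):
--                 for row_col2 in range(1, len(board)-2, 2):
--                     if board[row_col1][col1] == '.' and board[row_col2][col2] == '.' and is_true_threat(((row_col1, col1), (row_col2, col2))):
--                         inverted_highinverse = ((row_col2, col2), (row_col1, col1))
--                         if inverted_highinverse not in high_inverses: # Avoid duplicates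
--                             high_inverses.append(((row_col1, col1), (row_col2, col2)))
--     return high_inverses
-- ===== SOURCE B (Python) =====
-- def find_high_inverses(board):
--     rows = range(1, len(board) - 2, 2)
--     if len(rows) == 0:
--         return []
--     # Index: column -> ascending list of its empty odd rows (one pass per column).
--     index = {}
--     for c in range(len(board[0])):
--         empties = [r for r in rows if board[r][c] == '.']
--         if empties:
--             index[c] = empties
--     # A's discovery order = sort by (first empty odd row, column).
--     cols = sorted(index, key=lambda c: (index[c][0], c))
--     out = []
--     for i, c1 in enumerate(cols):
--         for c2 in cols[i + 1:]:
--             d = abs(c2 - c1)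
--             if d > 3:
--                 continue  # columns too far apart: no pair of rows can form a threat
--             present = set(index[c2])
--             for r1 in index[c1]:
--                 # the only rows of c2 a threat can reach from (r1, c1): same row or |dr| == d
--                 for r2 in (r1 - d, r1, r1 + d):
--                     if r2 in present:
--                         out.append(((r1, c1), (r2, c2)))
--     return out
-- ===== Notes on version B (the rewrite author's own statement) =====
-- stated objective: alternative
-- what changed: A scans every (odd row, odd row) pair per column pair and calls is_true_threat on each, with a dedup membership test that never fires; …
import Mathlib
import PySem

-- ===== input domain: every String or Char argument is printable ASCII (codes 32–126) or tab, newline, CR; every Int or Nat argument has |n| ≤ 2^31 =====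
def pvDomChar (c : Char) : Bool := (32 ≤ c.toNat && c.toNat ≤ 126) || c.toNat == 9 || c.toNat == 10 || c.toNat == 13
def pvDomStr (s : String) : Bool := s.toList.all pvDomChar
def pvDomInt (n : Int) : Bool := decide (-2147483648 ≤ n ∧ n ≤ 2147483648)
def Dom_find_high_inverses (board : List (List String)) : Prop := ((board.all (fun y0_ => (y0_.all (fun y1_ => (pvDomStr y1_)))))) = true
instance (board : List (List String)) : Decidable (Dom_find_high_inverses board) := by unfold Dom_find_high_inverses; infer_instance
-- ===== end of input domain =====

-- B replaces A's quadruple scan (is_true_threat on every odd-row pair per column pair, plus a dedup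
-- test that never fires) by a per-column index of empty odd rows built once, columns sorted by
-- (first empty odd row, column) — exactly A's discovery order — and the threat predicate inverted
-- into candidate generation: only the three reachable rows r1−d, r1, r1+d are tested per row
-- (objective: alternative algorithm, same observable behaviour).

-- ===== PORT A =====
-- is_true_threat (A's helper)
def pvIsTrueThreat (threat : (Int × Int) × (Int × Int)) : Bool :=
  let threat_start := threat.1
  let threat_end := threat.2
  let row_diff := threat_start.1 - threat_end.1
  if 3 < row_diff.natAbs then false
  else
    let col_diff := threat_start.2 - threat_end.2
    if 3 < col_diff.natAbs then false
    else if row_diff = 0 ∨ col_diff = 0 then true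
    else if row_diff.natAbs = col_diff.natAbs then true
    else false

-- board[r][c] (total form; Pre_ keeps every access in range)
def pvCell (board : List (List String)) (r c : Int) : String :=
  PySem.List.pyGetD (PySem.List.pyGetD board r []) c ""

def find_high_inverses (board : List (List String)) : List ((Int × Int) × (Int × Int)) :=
  let columns : List Int :=
    (PySem.List.pyRange 1 ((board.length : Int) - 2) 2).foldl (fun columns row =>
      (PySem.List.pyRange 0 (((PySem.List.pyGetD board 0 []).length : Int)) 1).foldl (fun columns col =>
        if pvCell board row col = "." ∧ col ∉ columns then columns ++ [col] else columns) columns) []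
  (PySem.List.pyRange 0 ((columns.length : Int)) 1).foldl (fun high_inverses i =>
    let col1 := PySem.List.pyGetD columns i 0
    (PySem.List.slice columns (some (i + 1)) none).foldl (fun high_inverses col2 =>
      (PySem.List.pyRange 1 ((board.length : Int) - 2) 2).foldl (fun high_inverses row_col1 =>
        (PySem.List.pyRange 1 ((board.length : Int) - 2) 2).foldl (fun high_inverses row_col2 =>
          if pvCell board row_col1 col1 = "." ∧ pvCell board row_col2 col2 = "." ∧
              pvIsTrueThreat ((row_col1, col1), (row_col2, col2)) = true then
            if ((row_col2, col2), (row_col1, col1)) ∈ high_inverses then high_inverses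
            else high_inverses ++ [((row_col1, col1), (row_col2, col2))]
          else high_inverses) high_inverses) high_inverses) high_inverses) []

-- ===== PORT B =====
def find_high_inverses_alt (board : List (List String)) : List ((Int × Int) × (Int × Int)) :=
  let rows := PySem.List.pyRange 1 ((board.length : Int) - 2) 2
  if rows.length = 0 then []
  else
    let index : PySem.Dict Int (List Int) :=
      (PySem.List.pyRange 0 (((PySem.List.pyGetD board 0 []).length : Int)) 1).foldl (fun index c =>
        let empties := rows.filter (fun r => pvCell board r c == ".")
        if empties ≠ [] then index.insert c empties else index) PySem.Dict.empty
    -- Python's tuple key (index[c][0], c) compares lexicographically = the Lex order on Int × Int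
    let cols : List Int :=
      PySem.List.sorted index.keys
        (fun c => toLex (PySem.List.pyGetD (index.getD c []) 0 0, c)) false
    (PySem.List.enumerate cols 0).foldl (fun out p =>
      (PySem.List.slice cols (some (p.1 + 1)) none).foldl (fun out c2 =>
        let d : Int := |c2 - p.2|
        if 3 < d then out   -- continue: columns too far apart
        else
          let present := PySem.Set.ofList (index.getD c2 [])
          (index.getD p.2 []).foldl (fun out r1 =>
            ([r1 - d, r1, r1 + d] : List Int).foldl (fun out r2 =>
              if PySem.Set.contains present r2 = true then out ++ [((r1, p.2), (r2, c2))]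
              else out) out) out) out) []

-- ===== PRECONDITION & SPEC =====
-- Pre_ excludes exactly the boards where the Python raises IndexError: a scanned odd row
-- (row ∈ range(1, len(board)-2, 2)) shorter than board[0]; both A and B raise there.
def Pre_find_high_inverses (board : List (List String)) : Prop :=
  ∀ r ∈ PySem.List.pyRange 1 ((board.length : Int) - 2) 2,
    (PySem.List.pyGetD board 0 []).length ≤ (PySem.List.pyGetD board r []).length
instance (board : List (List String)) : Decidable (Pre_find_high_inverses board) := by
  unfold Pre_find_high_inverses; infer_instance

def pvWitness_find_high_inverses : List (List String) :=
  [["x", "x"], [".", "x"], ["x", "x"], [".", "."], ["x", "x"], ["x", "x"]]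

def Spec_find_high_inverses (board : List (List String)) (out : List ((Int × Int) × (Int × Int))) : Prop := out = find_high_inverses_alt board
instance (board : List (List String)) (out : List ((Int × Int) × (Int × Int))) : Decidable (Spec_find_high_inverses board out) := by unfold Spec_find_high_inverses; infer_instance

-- ===== CLAIM (what is proved, stated in full; the proofs are below) =====
def Claim_equal_find_high_inverses : Prop := ∀ (board : List (List String)), Dom_find_high_inverses board → Pre_find_high_inverses board → Spec_find_high_inverses board (find_high_inverses board)

-- ===== LEMMAS AND PROOFS =====

-- Abbreviations for the pieces both ports are built from
def pvR (board : List (List String)) : List Int :=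
  PySem.List.pyRange 1 ((board.length : Int) - 2) 2

def pvW (board : List (List String)) : List Int :=
  PySem.List.pyRange 0 (((PySem.List.pyGetD board 0 []).length : Int)) 1

-- empty odd rows of column c, ascending
def pvEr (board : List (List String)) (c : Int) : List Int :=
  (pvR board).filter (fun r => pvCell board r c == ".")

-- first empty odd row of column c
def pvF (board : List (List String)) (c : Int) : Int := (pvEr board c).getD 0 0

def pvKeyP (board : List (List String)) (c : Int) : Lex (Int × Int) := toLex (pvF board c, c)

-- empty columns of row r, ascending
def pvRowCols (board : List (List String)) (r : Int) : List Int :=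
  (pvW board).filter (fun c => pvCell board r c == ".")

-- columns grouped by their first empty odd row, for the rows of P
def pvS (board : List (List String)) (P : List Int) : List Int :=
  P.flatMap (fun r => (pvRowCols board r).filter (fun c => pvF board c == r))

-- the dict B builds
def pvIndex (board : List (List String)) : PySem.Dict Int (List Int) :=
  (pvW board).foldl (fun index c =>
    let empties := (pvR board).filter (fun r => pvCell board r c == ".")
    if empties ≠ [] then index.insert c empties else index) PySem.Dict.empty

def pvColsB (board : List (List String)) : List Int :=
  PySem.List.sorted (pvIndex board).keys
    (fun c => toLex (PySem.List.pyGetD ((pvIndex board).getD c []) 0 0, c)) false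

-- the common canonical second phase
def pvPhase2 (board : List (List String)) (cols : List Int) : List ((Int × Int) × (Int × Int)) :=
  (PySem.List.pyRange 0 ((cols.length : Int)) 1).foldl (fun out i =>
    (PySem.List.slice cols (some (i + 1)) none).foldl (fun out c2 =>
      (pvEr board (PySem.List.pyGetD cols i 0)).foldl (fun out r1 =>
        (pvEr board c2).foldl (fun out r2 =>
          if pvIsTrueThreat ((r1, PySem.List.pyGetD cols i 0), (r2, c2)) = true then
            out ++ [((r1, PySem.List.pyGetD cols i 0), (r2, c2))] else out) out) out) out) []

lemma pvR_pairwise (board : List (List String)) : (pvR board).Pairwise (· < ·) := by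
  rw [pvR, PySem.List.pyRange_of_pos _ _ (by norm_num : (0:Int) < 2)]
  refine List.Pairwise.map _ ?_ (List.pairwise_lt_range)
  intro a b h; omega

lemma pvW_pairwise (board : List (List String)) : (pvW board).Pairwise (· < ·) :=
  PySem.List.pairwise_lt_pyRange_one _ _

lemma pvGetD_le_of_mem {l : List Int} (hp : l.Pairwise (· < ·)) {x : Int} (hx : x ∈ l) :
    l.getD 0 0 ≤ x := by
  cases l with
  | nil => simp at hx
  | cons a t =>
    rcases List.mem_cons.mp hx with rfl | h
    · simp
    · have := (List.pairwise_cons.mp hp).1 x h; simp; omega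

lemma pvGetD_mem {l : List Int} (h : l ≠ []) : l.getD 0 0 ∈ l := by
  cases l with
  | nil => simp at h
  | cons a t => simp

lemma mem_pvEr {board : List (List String)} {c r : Int} :
    r ∈ pvEr board c ↔ r ∈ pvR board ∧ pvCell board r c = "." := by
  simp [pvEr, List.mem_filter]

lemma pvEr_pairwise (board : List (List String)) (c : Int) :
    (pvEr board c).Pairwise (· < ·) := (pvR_pairwise board).filter _

lemma mem_pvRowCols {board : List (List String)} {r c : Int} :
    c ∈ pvRowCols board r ↔ c ∈ pvW board ∧ pvCell board r c = "." := by
  simp [pvRowCols, List.mem_filter]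

lemma pvF_mem {board : List (List String)} {c : Int} (h : pvEr board c ≠ []) :
    pvF board c ∈ pvEr board c := pvGetD_mem h

lemma mem_pvS {board : List (List String)} {P : List Int} (hP : ∀ x ∈ P, x ∈ pvR board)
    {c : Int} :
    c ∈ pvS board P ↔ c ∈ pvW board ∧ pvEr board c ≠ [] ∧ pvF board c ∈ P := by
  simp only [pvS, List.mem_flatMap, List.mem_filter, beq_iff_eq]
  constructor
  · rintro ⟨r, hrP, hc, hfr⟩
    have hcw := (mem_pvRowCols.mp hc).1
    have hcell := (mem_pvRowCols.mp hc).2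
    have hrer : r ∈ pvEr board c := mem_pvEr.mpr ⟨hP r hrP, hcell⟩
    have hne : pvEr board c ≠ [] := by intro h; rw [h] at hrer; simp at hrer
    exact ⟨hcw, hne, hfr ▸ hrP⟩
  · rintro ⟨hcw, hne, hfP⟩
    refine ⟨pvF board c, hfP, ?_, rfl⟩
    have := mem_pvEr.mp (pvF_mem hne)
    exact mem_pvRowCols.mpr ⟨hcw, this.2⟩

lemma pvRowCols_nodup (board : List (List String)) (r : Int) : (pvRowCols board r).Nodup :=
  ((pvW_pairwise board).imp ne_of_lt).filter _

-- A's first phase, inner loop = set update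
lemma pvInnerA (board : List (List String)) (r : Int) (s : List Int) :
    (pvW board).foldl (fun columns col =>
      if pvCell board r col = "." ∧ col ∉ columns then columns ++ [col] else columns) s
    = PySem.Set.update s (pvRowCols board r) := by
  have h1 : (pvW board).foldl (fun columns col =>
      if pvCell board r col = "." ∧ col ∉ columns then columns ++ [col] else columns) s
      = (pvW board).foldl (fun columns col =>
        if pvCell board r col = "." then PySem.Set.add columns col else columns) s := by
    apply PySem.List.foldl_congr_mem
    intro acc x _
    by_cases hc : pvCell board r x = "."
    · by_cases hm : x ∈ acc
      · rw [if_neg (by tauto), if_pos hc, PySem.Set.add_of_mem hm]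
      · rw [if_pos ⟨hc, hm⟩, if_pos hc, PySem.Set.add_of_not_mem hm]
    · rw [if_neg (by tauto), if_neg hc]
  rw [h1, PySem.List.foldl_ite_eq_foldl_filter (fun col => pvCell board r col = ".")]
  have h2 : (pvW board).filter (fun x => decide (pvCell board r x = "."))
      = pvRowCols board r := by
    apply List.filter_congr; intro x _; simp [beq_eq_decide]
  rw [h2]; rfl

-- A's first phase = pvS over any prefix of the scanned rows
lemma pvColsA_eq_pvS (board : List (List String)) :
    ∀ (P Q : List Int), pvR board = P ++ Q →
      P.foldl (fun s r => PySem.Set.update s (pvRowCols board r)) [] = pvS board P := by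
  intro P
  induction P using List.reverseRecOn with
  | nil => intro Q h; simp [pvS]
  | append_singleton P r ih =>
    intro Q h
    rw [List.foldl_append]
    have hPrefix : pvR board = P ++ (r :: Q) := by simpa using h
    rw [ih (r :: Q) hPrefix]
    simp only [List.foldl_cons, List.foldl_nil]
    rw [PySem.Set.update_eq_append_filter,
      PySem.Set.ofList_eq_self_of_nodup _ (pvRowCols_nodup board r)]
    have hpw := pvR_pairwise board
    rw [hPrefix] at hpw
    obtain ⟨hpwP, hpwRQ, hcross⟩ := List.pairwise_append.mp hpw
    have hrR : r ∈ pvR board := by rw [hPrefix]; simp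
    have hQgt : ∀ x ∈ Q, r < x := (List.pairwise_cons.mp hpwRQ).1
    have hPlt : ∀ x ∈ P, x < r := fun x hx => hcross x hx r (by simp)
    have hfilter : (pvRowCols board r).filter (fun y => !(PySem.Set.contains (pvS board P) y))
        = (pvRowCols board r).filter (fun c => pvF board c == r) := by
      apply List.filter_congr
      intro c hc
      have hcw := (mem_pvRowCols.mp hc).1
      have hcell := (mem_pvRowCols.mp hc).2
      have hrer : r ∈ pvEr board c := mem_pvEr.mpr ⟨hrR, hcell⟩
      have hne : pvEr board c ≠ [] := by intro h0; rw [h0] at hrer; simp at hrer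
      have hfle : pvF board c ≤ r := pvGetD_le_of_mem (pvEr_pairwise board c) hrer
      have hfR : pvF board c ∈ pvR board := (mem_pvEr.mp (pvF_mem hne)).1
      have hmemS : c ∈ pvS board P ↔ pvF board c ∈ P := by
        rw [mem_pvS (fun x hx => by rw [hPrefix]; simp [hx])]
        tauto
      have key : c ∉ pvS board P ↔ pvF board c = r := by
        rw [hmemS]
        constructor
        · intro hnp
          rw [hPrefix] at hfR
          rcases List.mem_append.mp hfR with h | h
          · exact absurd h hnp
          · rcases List.mem_cons.mp h with h | h
            · exact h
            · exact absurd (hQgt _ h) (by omega)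
        · intro he hP'
          exact absurd he (by have := hPlt _ hP'; omega)
      simp only [PySem.Set.contains_eq_listContains, List.contains_eq_mem]
      by_cases hmem : c ∈ pvS board P
      · have hne' : pvF board c ≠ r := fun he => (key.mpr he) hmem
        simp [hmem, hne']
      · simp [hmem, key.mp hmem]
    rw [hfilter]
    simp [pvS, List.flatMap_append]

-- the grouped column list is strictly sorted by (first empty row, column)
lemma pvS_pairwise (board : List (List String)) :
    (pvS board (pvR board)).Pairwise (fun a b => pvKeyP board a < pvKeyP board b) := by
  rw [pvS]
  rw [List.pairwise_flatMap]
  constructor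
  · intro r _
    have : (pvRowCols board r).Pairwise (· < ·) := (pvW_pairwise board).filter _
    refine ((this.filter _).imp_of_mem ?_)
    intro a b ha hb hab
    have hfa : pvF board a = r := by simpa using (List.of_mem_filter ha)
    have hfb : pvF board b = r := by simpa using (List.of_mem_filter hb)
    rw [pvKeyP, pvKeyP, Prod.Lex.toLex_lt_toLex]
    right; exact ⟨by rw [hfa, hfb], hab⟩
  · refine (pvR_pairwise board).imp ?_
    intro r1 r2 h12 x hx y hy
    have hfx : pvF board x = r1 := by simpa using (List.of_mem_filter hx)
    have hfy : pvF board y = r2 := by simpa using (List.of_mem_filter hy)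
    rw [pvKeyP, pvKeyP, Prod.Lex.toLex_lt_toLex]
    left; rw [hfx, hfy]; exact h12

lemma pvS_nodup (board : List (List String)) : (pvS board (pvR board)).Nodup := by
  exact (pvS_pairwise board).imp (fun {a b} h he => absurd (he ▸ h) (lt_irrefl _))

-- the dict: a conditional-insert loop over fresh ascending keys
lemma pvIndex_eq (board : List (List String)) :
    pvIndex board = ((pvW board).filter (fun c => decide (pvEr board c ≠ []))).foldl
      (fun (d : PySem.Dict Int (List Int)) c => d.insert c (pvEr board c)) PySem.Dict.empty := by
  rw [pvIndex]
  exact PySem.List.foldl_ite_eq_foldl_filter (fun c => pvEr board c ≠ [])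
    (fun (d : PySem.Dict Int (List Int)) c => d.insert c (pvEr board c)) _ _

lemma pvIndex_items (board : List (List String)) :
    (pvIndex board).items = ((pvW board).filter (fun c => decide (pvEr board c ≠ []))).map
      (fun c => (c, pvEr board c)) := by
  rw [pvIndex_eq]
  rw [PySem.Dict.items_foldl_insert_fresh _ (fun c => c) (fun c => pvEr board c) _
    (by intro a _; simp [PySem.Dict.contains_empty])
    (by simpa using (((pvW_pairwise board).imp ne_of_lt).filter _))]
  rfl

lemma pvIndex_keys (board : List (List String)) :
    (pvIndex board).keys = (pvW board).filter (fun c => decide (pvEr board c ≠ [])) := by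
  simp only [PySem.Dict.keys, pvIndex_items, List.map_map]
  simp [Function.comp_def]

lemma pvIndex_keys_nodup (board : List (List String)) : (pvIndex board).keys.Nodup := by
  rw [pvIndex_keys]
  exact ((pvW_pairwise board).imp ne_of_lt).filter _

lemma pvIndex_getD (board : List (List String)) {c : Int} (h : c ∈ (pvIndex board).keys) :
    (pvIndex board).getD c [] = pvEr board c := by
  rw [pvIndex_keys] at h
  refine PySem.Dict.getD_of_mem_items _ ?_ (pvIndex_keys_nodup board) _
  rw [pvIndex_items]
  exact List.mem_map.mpr ⟨c, h, rfl⟩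

lemma pvS_perm_keys (board : List (List String)) :
    (pvS board (pvR board)).Perm (pvIndex board).keys := by
  rw [List.perm_ext_iff_of_nodup (pvS_nodup board) (pvIndex_keys_nodup board)]
  intro c
  rw [mem_pvS (fun x hx => hx), pvIndex_keys, List.mem_filter]
  constructor
  · rintro ⟨h1, h2, _⟩; exact ⟨h1, by simpa using h2⟩
  · rintro ⟨h1, h2⟩
    have h2' : pvEr board c ≠ [] := by simpa using h2
    exact ⟨h1, h2', (mem_pvEr.mp (pvF_mem h2')).1⟩

-- B's sorted column list is exactly A's discovery order
lemma pvColsB_eq (board : List (List String)) : pvColsB board = pvS board (pvR board) := by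
  rw [pvColsB]
  refine PySem.List.sorted_eq_of_perm_of_pairwise_lt _ _ _ (pvS_perm_keys board) ?_
  refine (pvS_pairwise board).imp_of_mem ?_
  intro a b ha hb hab
  have hka : a ∈ (pvIndex board).keys := (pvS_perm_keys board).mem_iff.mp ha
  have hkb : b ∈ (pvIndex board).keys := (pvS_perm_keys board).mem_iff.mp hb
  rw [pvIndex_getD board hka, pvIndex_getD board hkb]
  have hz : ∀ c : Int, PySem.List.pyGetD (pvEr board c) 0 0 = pvF board c := by
    intro c; rw [PySem.List.pyGetD_zero]; rfl
  rw [hz, hz]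
  exact hab

-- generic: a fold that preserves an invariant and agrees with another fold under it
lemma pvFoldlInv {σ β : Type} (Q : σ → Prop) (f g : σ → β → σ) :
    ∀ (l : List β), (∀ s b, b ∈ l → Q s → Q (g s b) ∧ f s b = g s b) →
      ∀ s, Q s → l.foldl f s = l.foldl g s ∧ Q (l.foldl g s) := by
  intro l
  induction l with
  | nil => intro _ s hs; exact ⟨rfl, hs⟩
  | cons b t ih =>
    intro h s hs
    obtain ⟨hq, he⟩ := h s b (by simp) hs
    simp only [List.foldl_cons]
    rw [he]
    exact ih (fun s b hb hQ => h s b (by simp [hb]) hQ) (g s b) hq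

def pvK (board : List (List String)) (x : (Int × Int) × (Int × Int)) : Prop :=
  pvKeyP board x.1.2 < pvKeyP board x.2.2

-- A's literal second phase, as a function of the column list
def pvA2 (board : List (List String)) (columns : List Int) : List ((Int × Int) × (Int × Int)) :=
  (PySem.List.pyRange 0 ((columns.length : Int)) 1).foldl (fun high_inverses i =>
    (PySem.List.slice columns (some (i + 1)) none).foldl (fun high_inverses col2 =>
      (pvR board).foldl (fun high_inverses row_col1 =>
        (pvR board).foldl (fun high_inverses row_col2 =>
          if pvCell board row_col1 (PySem.List.pyGetD columns i 0) = "." ∧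
              pvCell board row_col2 col2 = "." ∧
              pvIsTrueThreat ((row_col1, PySem.List.pyGetD columns i 0), (row_col2, col2)) = true then
            if ((row_col2, col2), (row_col1, PySem.List.pyGetD columns i 0)) ∈ high_inverses then
              high_inverses
            else high_inverses ++ [((row_col1, PySem.List.pyGetD columns i 0), (row_col2, col2))]
          else high_inverses) high_inverses) high_inverses) high_inverses) []

-- B's literal second phase
def pvB2 (board : List (List String)) : List ((Int × Int) × (Int × Int)) :=
  (PySem.List.enumerate (pvColsB board) 0).foldl (fun out p =>
    (PySem.List.slice (pvColsB board) (some (p.1 + 1)) none).foldl (fun out c2 =>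
      if 3 < |c2 - p.2| then out
      else
        ((pvIndex board).getD p.2 []).foldl (fun out r1 =>
          ([r1 - |c2 - p.2|, r1, r1 + |c2 - p.2|] : List Int).foldl (fun out r2 =>
            if PySem.Set.contains (PySem.Set.ofList ((pvIndex board).getD c2 [])) r2 = true then
              out ++ [((r1, p.2), (r2, c2))]
            else out) out) out) out) []

lemma pvA_unfold (board : List (List String)) :
    find_high_inverses board = pvA2 board
      ((pvR board).foldl (fun columns row =>
        (pvW board).foldl (fun columns col =>
          if pvCell board row col = "." ∧ col ∉ columns then columns ++ [col] else columns)
          columns) []) := rfl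

lemma pvB_unfold (board : List (List String)) :
    find_high_inverses_alt board =
      if (pvR board).length = 0 then [] else pvB2 board := rfl

lemma pvKeyLt (board : List (List String)) {cols : List Int}
    (hp : cols.Pairwise (fun a b => pvKeyP board a < pvKeyP board b)) {i : Int}
    (h0 : 0 ≤ i) (hlen : i < (cols.length : Int)) {c2 : Int}
    (hc2 : c2 ∈ PySem.List.slice cols (some (i + 1)) none) :
    pvKeyP board (PySem.List.pyGetD cols i 0) < pvKeyP board c2 := by
  rw [PySem.List.slice_from cols (by omega : (0:Int) ≤ i + 1)] at hc2
  have hi : i.toNat < cols.length := by omega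
  rw [PySem.List.pyGetD_eq_getElem cols 0 h0 (by exact_mod_cast hlen)]
  have hsplit : List.take (i.toNat + 1) cols ++ List.drop (i.toNat + 1) cols = cols :=
    List.take_append_drop _ _
  have hp2 : (List.take (i.toNat + 1) cols ++ List.drop (i.toNat + 1) cols).Pairwise
      (fun a b => pvKeyP board a < pvKeyP board b) := by rw [hsplit]; exact hp
  obtain ⟨-, -, hcross⟩ := List.pairwise_append.mp hp2
  have h1 : cols[i.toNat] ∈ List.take (i.toNat + 1) cols := by
    have hlt : i.toNat < (List.take (i.toNat + 1) cols).length := by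
      rw [List.length_take]; omega
    have hg := List.getElem_take (xs := cols) (j := i.toNat + 1) (i := i.toNat) (h := hlt)
    rw [← hg]; exact List.getElem_mem _
  have h2 : c2 ∈ List.drop (i.toNat + 1) cols := by
    have hn : (i + 1).toNat = i.toNat + 1 := by omega
    rwa [hn] at hc2
  exact hcross _ h1 _ h2

-- with distinct columns, the threat predicate IS "same row or |row diff| = column distance ≤ 3"
lemma pvThreat_iff (c1 c2 r1 r2 : Int) (h : c1 ≠ c2) :
    pvIsTrueThreat ((r1, c1), (r2, c2)) = true ↔
      |c2 - c1| ≤ 3 ∧ (r2 = r1 - |c2 - c1| ∨ r2 = r1 ∨ r2 = r1 + |c2 - c1|) := by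
  have habs : |c2 - c1| = ((c2 - c1).natAbs : Int) := Int.abs_eq_natAbs _
  unfold pvIsTrueThreat
  simp only []
  rw [habs]
  split_ifs with h1 h2 h3 h4 <;>
    simp only [Bool.false_eq_true, false_iff, true_iff, not_and, not_or] <;>
    omega

-- two strictly ascending Int lists with the same members are equal
lemma pvSortedExt : ∀ {l1 l2 : List Int}, l1.Pairwise (· < ·) → l2.Pairwise (· < ·) →
    (∀ x, x ∈ l1 ↔ x ∈ l2) → l1 = l2 := by
  intro l1
  induction l1 with
  | nil =>
    intro l2 _ _ hm
    cases l2 with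
    | nil => rfl
    | cons b t => exact absurd ((hm b).mpr (by simp)) (by simp)
  | cons a t ih =>
    intro l2 h1 h2 hm
    cases l2 with
    | nil => exact absurd ((hm a).mp (by simp)) (by simp)
    | cons b t2 =>
      have hta := (List.pairwise_cons.mp h1).1
      have htb := (List.pairwise_cons.mp h2).1
      have hab : a = b := by
        have ha := (hm a).mp (by simp)
        have hb := (hm b).mpr (by simp)
        rcases List.mem_cons.mp ha with h | h
        · exact h
        · rcases List.mem_cons.mp hb with h' | h'
          · omega
          · have := hta b h'
            have := htb a h
            omega
      subst hab
      have htail : ∀ x, x ∈ t ↔ x ∈ t2 := by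
        intro x
        constructor
        · intro hx
          have hlt := hta x hx
          rcases List.mem_cons.mp ((hm x).mp (by simp [hx])) with h | h
          · omega
          · exact h
        · intro hx
          have hlt := htb x hx
          rcases List.mem_cons.mp ((hm x).mpr (by simp [hx])) with h | h
          · omega
          · exact h
      rw [ih (List.pairwise_cons.mp h1).2 (List.pairwise_cons.mp h2).2 htail]

-- the clean (dedup-free) double row scan collapses to B's candidate generation
lemma pvPairEq (board : List (List String)) (c1 c2 : Int) (hne : c1 ≠ c2)
    (s : List ((Int × Int) × (Int × Int))) :
    (pvEr board c1).foldl (fun out r1 =>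
      (pvEr board c2).foldl (fun out r2 =>
        if pvIsTrueThreat ((r1, c1), (r2, c2)) = true then
          out ++ [((r1, c1), (r2, c2))] else out) out) s
    = if 3 < |c2 - c1| then s
      else (pvEr board c1).foldl (fun out r1 =>
        ([r1 - |c2 - c1|, r1, r1 + |c2 - c1|] : List Int).foldl (fun out r2 =>
          if PySem.Set.contains (PySem.Set.ofList (pvEr board c2)) r2 = true then
            out ++ [((r1, c1), (r2, c2))] else out) out) s := by
  by_cases h3 : 3 < |c2 - c1|
  · rw [if_pos h3]
    have hfalse : ∀ r1 r2 : Int, pvIsTrueThreat ((r1, c1), (r2, c2)) ≠ true := by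
      intro r1 r2 hT
      have := (pvThreat_iff c1 c2 r1 r2 hne).mp hT
      omega
    rw [PySem.List.foldl_congr_mem (pvEr board c1) _ (fun out _ => out) s
      (by
        intro acc r1 _
        rw [PySem.List.foldl_congr_mem (pvEr board c2) _ (fun out _ => out) acc
          (by intro acc2 r2 _; rw [if_neg (hfalse r1 r2)])]
        exact PySem.List.foldl_ignore _ _)]
    exact PySem.List.foldl_ignore _ _
  · rw [if_neg h3]
    apply PySem.List.foldl_congr_mem
    intro acc r1 _
    rw [PySem.List.foldl_append_if _ (fun r2 => ((r1, c1), (r2, c2))),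
      PySem.List.foldl_append_if _ (fun r2 => ((r1, c1), (r2, c2)))]
    congr 1
    congr 1
    have hd1 : (1:Int) ≤ |c2 - c1| := by
      rcases lt_or_ge 0 (c2 - c1) with h | h
      · rw [abs_of_pos h]; omega
      · have : c2 - c1 < 0 := by omega
        rw [abs_of_neg this]; omega
    have hcandpw : ([r1 - |c2 - c1|, r1, r1 + |c2 - c1|] : List Int).Pairwise (· < ·) := by
      simp [List.pairwise_cons]
      omega
    have hL : (pvEr board c2).filter (fun r2 => pvIsTrueThreat ((r1, c1), (r2, c2)))
        = (pvEr board c2).filter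
            (fun r2 => decide (r2 ∈ ([r1 - |c2 - c1|, r1, r1 + |c2 - c1|] : List Int))) := by
      apply List.filter_congr
      intro r2 _
      have := pvThreat_iff c1 c2 r1 r2 hne
      by_cases hT : pvIsTrueThreat ((r1, c1), (r2, c2)) = true
      · have hr := (this.mp hT).2
        simp only [hT, decide_eq_true_eq, List.mem_cons, List.mem_singleton]
        symm; simp only [decide_eq_true_eq]
        simp only [List.mem_cons, List.not_mem_nil, or_false] at *
        tauto
      · have hnr : ¬ (r2 = r1 - |c2 - c1| ∨ r2 = r1 ∨ r2 = r1 + |c2 - c1|) := by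
          intro hr
          exact hT (this.mpr ⟨by omega, hr⟩)
        simp only [Bool.not_eq_true] at hT
        rw [hT]
        symm
        simp only [decide_eq_false_iff_not, List.mem_cons, List.not_mem_nil, or_false]
        tauto
    have hR : (([r1 - |c2 - c1|, r1, r1 + |c2 - c1|] : List Int).filter
          (fun r2 => PySem.Set.contains (PySem.Set.ofList (pvEr board c2)) r2))
        = ([r1 - |c2 - c1|, r1, r1 + |c2 - c1|] : List Int).filter
            (fun r2 => decide (r2 ∈ pvEr board c2)) := by
      apply List.filter_congr
      intro r2 _
      simp [PySem.Set.contains_eq_listContains, PySem.Set.mem_ofList]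
    rw [hL, hR]
    apply pvSortedExt ((pvEr_pairwise board c2).filter _) (hcandpw.filter _)
    intro x
    simp only [List.mem_filter, decide_eq_true_eq]
    tauto

-- dedup never fires: every stored pair has its first column strictly key-before its second
lemma pvInner2 (board : List (List String)) (c1 c2 : Int)
    (hk : pvKeyP board c1 < pvKeyP board c2) (s : List ((Int × Int) × (Int × Int)))
    (hs : ∀ x ∈ s, pvK board x) :
    ((pvR board).foldl (fun high_inverses r1 =>
      (pvR board).foldl (fun high_inverses r2 =>
        if pvCell board r1 c1 = "." ∧ pvCell board r2 c2 = "." ∧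
            pvIsTrueThreat ((r1, c1), (r2, c2)) = true then
          if ((r2, c2), (r1, c1)) ∈ high_inverses then high_inverses
          else high_inverses ++ [((r1, c1), (r2, c2))]
        else high_inverses) high_inverses) s
    = (pvEr board c1).foldl (fun out r1 =>
        (pvEr board c2).foldl (fun out r2 =>
          if pvIsTrueThreat ((r1, c1), (r2, c2)) = true then
            out ++ [((r1, c1), (r2, c2))] else out) out) s)
    ∧ (∀ x ∈ (pvEr board c1).foldl (fun out r1 =>
        (pvEr board c2).foldl (fun out r2 =>
          if pvIsTrueThreat ((r1, c1), (r2, c2)) = true then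
            out ++ [((r1, c1), (r2, c2))] else out) out) s, pvK board x) := by
  have hnotK : ∀ r1 r2 : Int, ¬ pvK board ((r2, c2), (r1, c1)) := by
    intro r1 r2 hcon
    exact absurd hk (lt_asymm hcon)
  have hclean : (pvR board).foldl (fun out r1 =>
      (pvR board).foldl (fun out r2 =>
        if pvCell board r1 c1 = "." ∧ pvCell board r2 c2 = "." ∧
            pvIsTrueThreat ((r1, c1), (r2, c2)) = true then
          out ++ [((r1, c1), (r2, c2))] else out) out) s
      = (pvEr board c1).foldl (fun out r1 =>
          (pvEr board c2).foldl (fun out r2 =>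
            if pvIsTrueThreat ((r1, c1), (r2, c2)) = true then
              out ++ [((r1, c1), (r2, c2))] else out) out) s := by
    have hfilt2 : (pvR board).filter (fun x => decide (pvCell board x c2 = ".")) = pvEr board c2 := by
      apply List.filter_congr; intro x _; simp [beq_eq_decide]
    have hfilt1 : (pvR board).filter (fun x => decide (pvCell board x c1 = ".")) = pvEr board c1 := by
      apply List.filter_congr; intro x _; simp [beq_eq_decide]
    have hinner : ∀ (a : List ((Int × Int) × (Int × Int))) (r1 : Int),
        (pvR board).foldl (fun out r2 =>
          if pvCell board r1 c1 = "." ∧ pvCell board r2 c2 = "." ∧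
              pvIsTrueThreat ((r1, c1), (r2, c2)) = true then
            out ++ [((r1, c1), (r2, c2))] else out) a
        = if pvCell board r1 c1 = "." then
            (pvEr board c2).foldl (fun out r2 =>
              if pvIsTrueThreat ((r1, c1), (r2, c2)) = true then
                out ++ [((r1, c1), (r2, c2))] else out) a
          else a := by
      intro a r1
      by_cases hA1 : pvCell board r1 c1 = "."
      · rw [if_pos hA1]
        rw [PySem.List.foldl_congr_mem (pvR board) _
          (fun out r2 => if pvCell board r2 c2 = "." then
            (if pvIsTrueThreat ((r1, c1), (r2, c2)) = true then
              out ++ [((r1, c1), (r2, c2))] else out) else out) a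
          (by intro acc x _
              by_cases h2 : pvCell board x c2 = "." <;>
                by_cases hT : pvIsTrueThreat ((r1, c1), (x, c2)) = true <;>
                simp [hA1, h2, hT])]
        rw [PySem.List.foldl_ite_eq_foldl_filter (fun r2 => pvCell board r2 c2 = ".")
          (fun out r2 => if pvIsTrueThreat ((r1, c1), (r2, c2)) = true then
            out ++ [((r1, c1), (r2, c2))] else out)]
        rw [hfilt2]
      · rw [if_neg hA1]
        rw [PySem.List.foldl_congr_mem (pvR board) _ (fun out _ => out) a
          (by intro acc x _; simp [hA1])]
        exact PySem.List.foldl_ignore _ _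
    rw [PySem.List.foldl_congr_mem (pvR board) _
      (fun out r1 => if pvCell board r1 c1 = "." then
        (pvEr board c2).foldl (fun out r2 =>
          if pvIsTrueThreat ((r1, c1), (r2, c2)) = true then
            out ++ [((r1, c1), (r2, c2))] else out) out
        else out) s
      (by intro acc x _; exact hinner acc x)]
    rw [PySem.List.foldl_ite_eq_foldl_filter (fun r1 => pvCell board r1 c1 = ".")
      (fun out r1 => (pvEr board c2).foldl (fun out r2 =>
        if pvIsTrueThreat ((r1, c1), (r2, c2)) = true then
          out ++ [((r1, c1), (r2, c2))] else out) out)]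
    rw [hfilt1]
  have hstep2 : ∀ (r1 : Int) (a' : List ((Int × Int) × (Int × Int))) (r2 : Int),
      r2 ∈ pvR board → (∀ x ∈ a', pvK board x) →
      (∀ x ∈ (fun high_inverses r2 =>
        if pvCell board r1 c1 = "." ∧ pvCell board r2 c2 = "." ∧
            pvIsTrueThreat ((r1, c1), (r2, c2)) = true then
          high_inverses ++ [((r1, c1), (r2, c2))]
        else high_inverses) a' r2, pvK board x)
      ∧ (fun high_inverses r2 =>
        if pvCell board r1 c1 = "." ∧ pvCell board r2 c2 = "." ∧
            pvIsTrueThreat ((r1, c1), (r2, c2)) = true then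
          if ((r2, c2), (r1, c1)) ∈ high_inverses then high_inverses
          else high_inverses ++ [((r1, c1), (r2, c2))]
        else high_inverses) a' r2
        = (fun high_inverses r2 =>
        if pvCell board r1 c1 = "." ∧ pvCell board r2 c2 = "." ∧
            pvIsTrueThreat ((r1, c1), (r2, c2)) = true then
          high_inverses ++ [((r1, c1), (r2, c2))]
        else high_inverses) a' r2 := by
    intro r1 a' r2 _ ha'
    constructor
    · by_cases hC : pvCell board r1 c1 = "." ∧ pvCell board r2 c2 = "." ∧
          pvIsTrueThreat ((r1, c1), (r2, c2)) = true
      · simp only [if_pos hC]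
        intro x hx
        rcases List.mem_append.mp hx with h | h
        · exact ha' x h
        · simp at h; subst h; exact hk
      · simp only [if_neg hC]; exact ha'
    · by_cases hC : pvCell board r1 c1 = "." ∧ pvCell board r2 c2 = "." ∧
          pvIsTrueThreat ((r1, c1), (r2, c2)) = true
      · simp only [if_pos hC]
        have hnm : ((r2, c2), (r1, c1)) ∉ a' := fun hm => hnotK r1 r2 (ha' _ hm)
        rw [if_neg hnm]
      · simp only [if_neg hC]
  have h1 := pvFoldlInv (fun a => ∀ x ∈ a, pvK board x)
    (fun high_inverses r1 =>
      (pvR board).foldl (fun high_inverses r2 =>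
        if pvCell board r1 c1 = "." ∧ pvCell board r2 c2 = "." ∧
            pvIsTrueThreat ((r1, c1), (r2, c2)) = true then
          if ((r2, c2), (r1, c1)) ∈ high_inverses then high_inverses
          else high_inverses ++ [((r1, c1), (r2, c2))]
        else high_inverses) high_inverses)
    (fun high_inverses r1 =>
      (pvR board).foldl (fun high_inverses r2 =>
        if pvCell board r1 c1 = "." ∧ pvCell board r2 c2 = "." ∧
            pvIsTrueThreat ((r1, c1), (r2, c2)) = true then
          high_inverses ++ [((r1, c1), (r2, c2))]
        else high_inverses) high_inverses)
    (pvR board)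
    (by
      intro a r1 _ ha
      have h2 := pvFoldlInv (fun a => ∀ x ∈ a, pvK board x) _ _ (pvR board)
        (hstep2 r1) a ha
      exact ⟨h2.2, h2.1⟩)
    s hs
  rw [hclean] at h1
  exact h1

-- A's second phase = canonical second phase, for a key-sorted column list
lemma pvA2_eq (board : List (List String)) (cols : List Int)
    (hp : cols.Pairwise (fun a b => pvKeyP board a < pvKeyP board b)) :
    pvA2 board cols = pvPhase2 board cols := by
  rw [pvA2, pvPhase2]
  have hstep : ∀ (s : List ((Int × Int) × (Int × Int))) (i : Int),
      i ∈ PySem.List.pyRange 0 ((cols.length : Int)) 1 → (∀ x ∈ s, pvK board x) →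
      (∀ x ∈ (PySem.List.slice cols (some (i + 1)) none).foldl (fun out c2 =>
        (pvEr board (PySem.List.pyGetD cols i 0)).foldl (fun out r1 =>
          (pvEr board c2).foldl (fun out r2 =>
            if pvIsTrueThreat ((r1, PySem.List.pyGetD cols i 0), (r2, c2)) = true then
              out ++ [((r1, PySem.List.pyGetD cols i 0), (r2, c2))] else out) out) out) s,
        pvK board x)
      ∧ (PySem.List.slice cols (some (i + 1)) none).foldl (fun high_inverses col2 =>
        (pvR board).foldl (fun high_inverses row_col1 =>
          (pvR board).foldl (fun high_inverses row_col2 =>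
            if pvCell board row_col1 (PySem.List.pyGetD cols i 0) = "." ∧
                pvCell board row_col2 col2 = "." ∧
                pvIsTrueThreat ((row_col1, PySem.List.pyGetD cols i 0), (row_col2, col2)) = true then
              if ((row_col2, col2), (row_col1, PySem.List.pyGetD cols i 0)) ∈ high_inverses then
                high_inverses
              else high_inverses ++ [((row_col1, PySem.List.pyGetD cols i 0), (row_col2, col2))]
            else high_inverses) high_inverses) high_inverses) s
        = (PySem.List.slice cols (some (i + 1)) none).foldl (fun out c2 =>
          (pvEr board (PySem.List.pyGetD cols i 0)).foldl (fun out r1 =>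
            (pvEr board c2).foldl (fun out r2 =>
              if pvIsTrueThreat ((r1, PySem.List.pyGetD cols i 0), (r2, c2)) = true then
                out ++ [((r1, PySem.List.pyGetD cols i 0), (r2, c2))] else out) out) out) s := by
    intro s i hi hQ
    have hi' := PySem.List.mem_pyRange_one.mp hi
    have h := pvFoldlInv (fun out => ∀ x ∈ out, pvK board x) _ _
      (PySem.List.slice cols (some (i + 1)) none)
      (by
        intro s' c2 hc2 hQ'
        have hk := pvKeyLt board hp hi'.1 hi'.2 hc2
        have h2 := pvInner2 board (PySem.List.pyGetD cols i 0) c2 hk s' hQ'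
        exact ⟨h2.2, h2.1⟩)
      s hQ
    exact ⟨h.2, h.1⟩
  exact (pvFoldlInv (fun out => ∀ x ∈ out, pvK board x) _ _ _
    (fun s i hi hQ => ⟨(hstep s i hi hQ).1, (hstep s i hi hQ).2⟩) [] (by simp)).1

lemma pvColsB_perm_keys (board : List (List String)) :
    (pvColsB board).Perm (pvIndex board).keys := by
  rw [pvColsB_eq]; exact pvS_perm_keys board

lemma pvKey_ne {board : List (List String)} {c1 c2 : Int}
    (h : pvKeyP board c1 < pvKeyP board c2) : c1 ≠ c2 := by
  intro he
  rw [he] at h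
  exact absurd h (lt_irrefl _)

-- B's second phase = canonical second phase
lemma pvB2_eq (board : List (List String)) : pvB2 board = pvPhase2 board (pvColsB board) := by
  rw [pvB2, pvPhase2, PySem.List.enumerate_eq_map_pyRange (pvColsB board) 0, List.foldl_map]
  have hlen : PySem.List.len (pvColsB board) = ((pvColsB board).length : Int) :=
    PySem.List.len_eq _
  rw [hlen]
  have hpB : (pvColsB board).Pairwise (fun a b => pvKeyP board a < pvKeyP board b) := by
    rw [pvColsB_eq]; exact pvS_pairwise board
  apply PySem.List.foldl_congr_mem
  intro acc i hi
  have hi' := PySem.List.mem_pyRange_one.mp hi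
  have hc1mem : PySem.List.pyGetD (pvColsB board) i 0 ∈ (pvIndex board).keys := by
    rw [PySem.List.pyGetD_eq_getElem (pvColsB board) 0 hi'.1 (by exact_mod_cast hi'.2)]
    exact (pvColsB_perm_keys board).mem_iff.mp (List.getElem_mem _)
  apply PySem.List.foldl_congr_mem
  intro acc2 c2 hc2
  have hc2mem : c2 ∈ (pvIndex board).keys :=
    (pvColsB_perm_keys board).mem_iff.mp (PySem.List.mem_of_mem_slice _ _ _ hc2)
  have hk := pvKeyLt board hpB hi'.1 hi'.2 hc2
  have hne : PySem.List.pyGetD (pvColsB board) i 0 ≠ c2 := pvKey_ne hk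
  rw [pvIndex_getD board hc1mem, pvIndex_getD board hc2mem]
  exact (pvPairEq board (PySem.List.pyGetD (pvColsB board) i 0) c2 hne acc2).symm

-- ===== VERDICT (by name: the statement is the Claim_ definition above) =====
theorem find_high_inverses_spec : Claim_equal_find_high_inverses := by
  intro board _ _
  unfold Spec_find_high_inverses
  rw [pvA_unfold, pvB_unfold]
  by_cases hR : (pvR board).length = 0
  · rw [if_pos hR]
    have hnil : pvR board = [] := List.length_eq_zero_iff.mp hR
    rw [hnil]
    simp [pvA2, PySem.List.pyRange_one_eq_nil]
  · rw [if_neg hR]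
    have hcols : (pvR board).foldl (fun columns row =>
        (pvW board).foldl (fun columns col =>
          if pvCell board row col = "." ∧ col ∉ columns then columns ++ [col] else columns)
          columns) [] = pvS board (pvR board) := by
      rw [PySem.List.foldl_congr_mem (pvR board) _
        (fun s r => PySem.Set.update s (pvRowCols board r)) []
        (by intro acc r _; exact pvInnerA board r acc)]
      exact pvColsA_eq_pvS board (pvR board) [] (by simp)
    rw [hcols, pvA2_eq board _ (pvS_pairwise board), pvB2_eq board, pvColsB_eq board]
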